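-- pv_equiv track=rewrite | github.com/bazoon/algo | puzzles/keymaster.py | master
-- ===== SOURCE A (Python) =====
-- def master(doors):
--     l = len(doors)
--
--     # 1
--     for i in range(l):
--         doors[i] = True
--
--     # 2
--     for i in range(0, l, 2):
--         doors[i] = False
--
--     for s in range(3, l):
--         for i in range(0, l, s):
--             doors[i] = not doors[i]
--
--
--     return doors
-- ===== SOURCE B (Python) =====
-- def master(doors):
--     # Closed form per door: after all the toggle passes, door i (i >= 1) is open
--     # iff i is a perfect square; door 0 ends open iff len >= 4 and len is even.
--     # Mutates doors in place and returns it, like the original.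
--     l = len(doors)
--     for i in range(l):
--         doors[i] = False
--     k = 1
--     while k * k < l:
--         doors[k * k] = True
--         k += 1
--     if l > 0:
--         doors[0] = l >= 4 and l % 2 == 0
--     return doors
-- ===== Notes on version B (the rewrite author's own statement) =====
-- stated objective: faster
-- what changed: Replaces the harmonic-series of toggle passes by a per-door closed form: door i (i>=1) is open iff i is a perfect square (parity of divisor count), and door 0's state is the parity of l-3; B just writes False everywhere and marks the squares.
import Mathlib
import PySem

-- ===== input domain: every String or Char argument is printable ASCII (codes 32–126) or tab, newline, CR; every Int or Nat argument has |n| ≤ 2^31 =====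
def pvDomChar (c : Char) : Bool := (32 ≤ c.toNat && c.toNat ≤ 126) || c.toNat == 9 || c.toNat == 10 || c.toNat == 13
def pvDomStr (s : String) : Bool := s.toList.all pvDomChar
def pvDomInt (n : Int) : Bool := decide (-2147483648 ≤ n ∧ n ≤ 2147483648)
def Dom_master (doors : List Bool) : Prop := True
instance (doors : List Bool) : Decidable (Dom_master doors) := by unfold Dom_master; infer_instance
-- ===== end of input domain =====

-- B replaces A's O(l log l) toggle passes by an O(l) closed form (door i>=1 open iff i is a
-- perfect square; door 0 from the parity of l-3); both mutate the list in place in Python,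
-- the equivalence proved here is about the returned value.

-- ===== PORT A =====
def master (doors : List Bool) : List Bool :=
  let l : Int := doors.length
  let d1 := (PySem.List.pyRange 0 l 1).foldl (fun ds i => ds.set i.toNat true) doors
  let d2 := (PySem.List.pyRange 0 l 2).foldl (fun ds i => ds.set i.toNat false) d1
  (PySem.List.pyRange 3 l 1).foldl
    (fun ds s => (PySem.List.pyRange 0 l s).foldl
      (fun ds i => ds.set i.toNat (!(ds.getD i.toNat false))) ds) d2

-- ===== PORT B =====
theorem fillSquares_dec {l k : Nat} (h : k * k < l) : l - (k + 1) < l - k := by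
  have h2 : k ≤ k * k := by
    cases k with
    | zero => simp
    | succ n => exact Nat.le_mul_of_pos_left _ (Nat.succ_pos n)
  omega

-- the 'while k*k < l' loop of Source B
def fillSquares (ds : List Bool) (l k : Nat) : List Bool :=
  if h : k * k < l then fillSquares (ds.set (k * k) true) l (k + 1) else ds
termination_by l - k
decreasing_by exact fillSquares_dec h

def master_alt (doors : List Bool) : List Bool :=
  let l := doors.length
  let ds0 := (List.range l).foldl (fun ds i => ds.set i false) doors
  let ds1 := fillSquares ds0 l 1
  if 0 < l then ds1.set 0 (decide (4 ≤ l ∧ l % 2 = 0)) else ds1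

-- ===== PRECONDITION & SPEC =====
def Spec_master (doors : List Bool) (out : List Bool) : Prop := out = master_alt doors
instance (doors : List Bool) (out : List Bool) : Decidable (Spec_master doors out) := by unfold Spec_master; infer_instance

-- ===== CLAIM (what is proved, stated in full; the proofs are below) =====
def Claim_equal_master : Prop := ∀ (doors : List Bool), Dom_master doors → Spec_master doors (master doors)

-- ===== LEMMAS AND PROOFS =====

-- a foldl whose step preserves length preserves length
theorem foldl_length_inv {ι : Type} (f : List Bool → ι → List Bool)
    (hf : ∀ ds i, (f ds i).length = ds.length) (idxs : List ι) (ds : List Bool) :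
    (idxs.foldl f ds).length = ds.length := by
  induction idxs generalizing ds with
  | nil => rfl
  | cons i t ih => simpa [hf] using ih (f ds i)

-- writing a constant at every index of the list
theorem foldl_set_const (idxs : List Nat) (c : Bool) (ds : List Bool) (j : Nat) :
    (idxs.foldl (fun ds i => ds.set i c) ds)[j]? =
      if j ∈ idxs then ds[j]?.map (fun _ => c) else ds[j]? := by
  induction idxs generalizing ds with
  | nil => simp
  | cons i t ih =>
    rw [List.foldl_cons, ih]
    by_cases ht : j ∈ t
    · simp only [List.mem_cons, ht, or_true, if_pos]
      by_cases hij : i = j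
      · subst hij
        by_cases hlt : i < ds.length
        · simp [List.getElem?_set, hlt, List.getElem?_eq_getElem hlt]
        · simp [List.getElem?_set, hlt, List.getElem?_eq_none (by omega : ds.length ≤ i)]
      · simp [List.getElem?_set, hij]
    · by_cases hij : j = i
      · subst hij
        simp only [List.mem_cons, true_or, if_pos]
        by_cases hlt : j < ds.length
        · simp [List.getElem?_set, hlt, List.getElem?_eq_getElem hlt]
        · simp [List.getElem?_set, hlt, List.getElem?_eq_none (by omega : ds.length ≤ j)]
      · have hne : i ≠ j := fun h => hij (Eq.symm h)
        simp [List.getElem?_set, ht, hne, hij]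

-- toggling once at each index of a duplicate-free index list
theorem foldl_toggle (idxs : List Nat) (hnd : idxs.Nodup) (ds : List Bool) (j : Nat) :
    (idxs.foldl (fun ds i => ds.set i (!(ds.getD i false))) ds)[j]? =
      if j ∈ idxs then ds[j]?.map (fun b => !b) else ds[j]? := by
  induction idxs generalizing ds with
  | nil => simp
  | cons i t ih =>
    obtain ⟨hit, hndt⟩ := List.nodup_cons.mp hnd
    rw [List.foldl_cons, ih hndt]
    by_cases ht : j ∈ t
    · have hij : i ≠ j := fun h => hit (h ▸ ht)
      simp [List.getElem?_set, ht, hij]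
    · by_cases hij : j = i
      · subst hij
        simp only [List.mem_cons, true_or, if_pos, ht, if_neg]
        by_cases hlt : j < ds.length
        · simp [List.getElem?_set, hlt, List.getElem?_eq_getElem hlt, List.getD_eq_getElem?_getD]
        · simp [List.getElem?_set, hlt, List.getElem?_eq_none (by omega : ds.length ≤ j)]
      · have hne : i ≠ j := fun h => hij (Eq.symm h)
        simp [List.getElem?_set, ht, hne, hij]

-- composing passes, each of which conditionally toggles index j
theorem foldl_toggleIf (l : Nat) (F : List Bool → Int → List Bool) (P : Int → Nat → Bool)
    (ss : List Int)
    (hF : ∀ s ∈ ss, ∀ ds : List Bool, ds.length = l →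
      (F ds s).length = l ∧ ∀ j, (F ds s)[j]? = if P s j then ds[j]?.map (fun b => !b) else ds[j]?) :
    ∀ ds : List Bool, ds.length = l →
      (ss.foldl F ds).length = l ∧ ∀ j, (ss.foldl F ds)[j]? =
        ds[j]?.map (fun b => xor b (decide (Odd (ss.countP (fun s => P s j))))) := by
  revert hF
  induction ss with
  | nil =>
    intro _ ds h
    refine ⟨h, fun j => ?_⟩
    simp [List.countP_nil]
  | cons s t ih =>
    intro hF ds h
    obtain ⟨h1, h2⟩ := hF s (List.mem_cons_self) ds h
    have ih' := ih (fun s' hs' => hF s' (List.mem_cons_of_mem _ hs')) (F ds s) h1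
    refine ⟨ih'.1, fun j => ?_⟩
    rw [List.foldl_cons, ih'.2 j, h2 j, List.countP_cons]
    by_cases hp : P s j
    · simp only [hp, if_pos, if_true]
      cases hb : ds[j]? with
      | none => simp
      | some b =>
        simp only [Option.map_some]
        congr 1
        by_cases ho : Odd (t.countP fun s => P s j) <;>
          cases b <;> simp [ho, Nat.odd_add_one, hp]
    · simp [hp]

-- the Nat index set touched by 'for i in range(0, l, s)'
theorem mem_multiples (l : Nat) (s : Int) (hs : 0 < s) (j : Nat) :
    (j ∈ (PySem.List.pyRange 0 (l : Int) s).map Int.toNat) ↔ (j < l ∧ s ∣ (j : Int)) := by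
  rw [List.mem_map]
  constructor
  · rintro ⟨x, hx, rfl⟩
    rw [PySem.List.mem_pyRange_iff_of_pos hs] at hx
    obtain ⟨h0, hlt, hdvd⟩ := hx
    have hx' : ((x.toNat : Int)) = x := Int.toNat_of_nonneg h0
    constructor
    · omega
    · rw [hx']; simpa using hdvd
  · rintro ⟨hlt, hdvd⟩
    refine ⟨(j : Int), ?_, by simp⟩
    rw [PySem.List.mem_pyRange_iff_of_pos hs]
    exact ⟨by positivity, by exact_mod_cast hlt, by simpa using hdvd⟩

theorem nodup_multiples (l : Nat) (s : Int) (hs : 0 < s) :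
    ((PySem.List.pyRange 0 (l : Int) s).map Int.toNat).Nodup := by
  rw [PySem.List.pyRange_of_pos _ _ hs, List.map_map]
  have hs' : ((s.toNat : Int)) = s := Int.toNat_of_nonneg hs.le
  have hcomp : (Int.toNat ∘ fun k : ℕ => (0 : Int) + s * ↑k) = fun k : ℕ => s.toNat * k := by
    funext k
    show ((0 : Int) + s * ↑k).toNat = s.toNat * k
    have : (0 : Int) + s * ↑k = ((s.toNat * k : ℕ) : Int) := by push_cast [hs']; ring
    rw [this, Int.toNat_natCast]
  rw [hcomp]
  refine List.Nodup.map ?_ (List.nodup_range)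
  intro a b hab
  have hpos : 0 < s.toNat := by omega
  exact Nat.eq_of_mul_eq_mul_left hpos hab

-- number of passes among s = 3 .. l-1 that toggle door j
def countDiv (j l : Nat) : Nat :=
  (PySem.List.pyRange 3 (l : Int) 1).countP
    (fun s => decide (j ∈ (PySem.List.pyRange 0 (l : Int) s).map Int.toNat))

-- pointwise value of port A
theorem master_eval (doors : List Bool) :
    (master doors).length = doors.length ∧ ∀ j : Nat, j < doors.length →
      (master doors)[j]? = some (xor (decide (j % 2 = 1)) (decide (Odd (countDiv j doors.length)))) := by
  set l := doors.length with hl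
  have hrw : master doors = ((PySem.List.pyRange 3 (l : Int) 1).foldl
      (fun ds s => ((PySem.List.pyRange 0 (l : Int) s).map Int.toNat).foldl
        (fun ds i => ds.set i (!(ds.getD i false))) ds)
      (((PySem.List.pyRange 0 (l : Int) 2).map Int.toNat).foldl (fun ds i => ds.set i false)
        (((PySem.List.pyRange 0 (l : Int) 1).map Int.toNat).foldl (fun ds i => ds.set i true) doors))) := by
    simp only [master, List.foldl_map]
    rfl
  set d1 := ((PySem.List.pyRange 0 (l : Int) 1).map Int.toNat).foldl (fun ds i => ds.set i true) doors with hd1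
  set d2 := ((PySem.List.pyRange 0 (l : Int) 2).map Int.toNat).foldl (fun ds i => ds.set i false) d1 with hd2
  have hlen1 : d1.length = l := foldl_length_inv _ (by intro ds i; simp) _ _
  have hlen2 : d2.length = l := by
    rw [hd2, foldl_length_inv _ (by intro ds i; simp)]; exact hlen1
  have hpt1 : ∀ j : Nat, j < l → d1[j]? = some true := by
    intro j hj
    rw [hd1, foldl_set_const, if_pos ((mem_multiples l 1 one_pos j).mpr ⟨hj, one_dvd _⟩),
      List.getElem?_eq_getElem hj]
    simp
  have hpt2 : ∀ j : Nat, j < l → d2[j]? = some (decide (j % 2 = 1)) := by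
    intro j hj
    rw [hd2, foldl_set_const]
    by_cases h2 : 2 ∣ j
    · rw [if_pos ((mem_multiples l 2 two_pos j).mpr ⟨hj, by exact_mod_cast Int.natCast_dvd_natCast.mpr h2⟩),
        hpt1 j hj]
      simp [Nat.dvd_iff_mod_eq_zero] at h2 ⊢
      omega
    · rw [if_neg (fun hmem => h2 (by exact_mod_cast ((mem_multiples l 2 two_pos j).mp hmem).2)),
        hpt1 j hj]
      simp [Nat.dvd_iff_mod_eq_zero] at h2 ⊢
      omega
  have hmain := foldl_toggleIf l
    (fun ds s => ((PySem.List.pyRange 0 (l : Int) s).map Int.toNat).foldl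
      (fun ds i => ds.set i (!(ds.getD i false))) ds)
    (fun s j => decide (j ∈ (PySem.List.pyRange 0 (l : Int) s).map Int.toNat))
    (PySem.List.pyRange 3 (l : Int) 1)
    (by
      intro s hsmem ds hds
      have hs3 : 3 ≤ s := ((PySem.List.mem_pyRange_one).mp hsmem).1
      have hspos : 0 < s := by omega
      refine ⟨by rw [foldl_length_inv _ (by intro ds i; simp)]; exact hds, fun j => ?_⟩
      rw [foldl_toggle _ (nodup_multiples l s hspos)]
      simp)
    d2 hlen2
  constructor
  · rw [hrw]; exact hmain.1
  · intro j hj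
    rw [hrw, hmain.2 j, hpt2 j hj]
    rfl

-- pointwise value of fillSquares
theorem fillSquares_eval (l k : Nat) (ds : List Bool) (h : ds.length = l) (j : Nat) :
    (fillSquares ds l k)[j]? =
      if k ≤ Nat.sqrt j ∧ Nat.sqrt j * Nat.sqrt j = j ∧ j < l then ds[j]?.map (fun _ => true)
      else ds[j]? := by
  have hk_le : ∀ k : Nat, k ≤ k * k := by
    intro k
    cases k with
    | zero => simp
    | succ n => exact Nat.le_mul_of_pos_left _ (Nat.succ_pos n)
  suffices H : ∀ m k (ds : List Bool), ds.length = l → l - k ≤ m →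
      (fillSquares ds l k)[j]? =
        if k ≤ Nat.sqrt j ∧ Nat.sqrt j * Nat.sqrt j = j ∧ j < l then ds[j]?.map (fun _ => true)
        else ds[j]? by
    exact H (l - k) k ds h le_rfl
  intro m
  induction m with
  | zero =>
    intro k ds h hm
    have hstop : ¬ k * k < l := by have := hk_le k; omega
    rw [fillSquares, dif_neg hstop, if_neg ?_]
    rintro ⟨h1, h2, h3⟩
    have : k * k ≤ Nat.sqrt j * Nat.sqrt j := Nat.mul_le_mul h1 h1
    omega
  | succ m ihm =>
    intro k ds h hm
    by_cases hlt : k * k < l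
    · have hkl : k < l := by have := hk_le k; omega
      rw [fillSquares, dif_pos hlt, ihm (k + 1) _ (by simp [h]) (by omega)]
      by_cases hjk : j = k * k
      · subst hjk
        have hsq : Nat.sqrt (k * k) = k := Nat.sqrt_eq k
        rw [if_neg (by rw [hsq]; omega), if_pos ⟨by omega, by rw [hsq], by omega⟩,
          List.getElem?_set, if_pos rfl, if_pos (by omega), List.getElem?_eq_getElem (by omega)]
        simp
      · have hset : (ds.set (k * k) true)[j]? = ds[j]? := by
          rw [List.getElem?_set, if_neg (fun h' => hjk (Eq.symm h'))]
        by_cases hc : (k + 1) ≤ Nat.sqrt j ∧ Nat.sqrt j * Nat.sqrt j = j ∧ j < l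
        · rw [if_pos hc, if_pos ⟨by omega, hc.2.1, hc.2.2⟩, hset]
        · rw [if_neg hc, hset, if_neg ?_]
          rintro ⟨ha, hb, hcc⟩
          apply hc
          refine ⟨?_, hb, hcc⟩
          rcases Nat.lt_or_ge k (Nat.sqrt j) with h' | h'
          · omega
          · exfalso
            have hh : Nat.sqrt j = k := by omega
            exact hjk (by rw [← hb, hh])
    · rw [fillSquares, dif_neg hlt, if_neg ?_]
      rintro ⟨h1, h2, h3⟩
      have : k * k ≤ Nat.sqrt j * Nat.sqrt j := Nat.mul_le_mul h1 h1
      omega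

theorem fillSquares_length (l k : Nat) (ds : List Bool) :
    (fillSquares ds l k).length = ds.length := by
  have hk_le : ∀ k : Nat, k ≤ k * k := by
    intro k
    cases k with
    | zero => simp
    | succ n => exact Nat.le_mul_of_pos_left _ (Nat.succ_pos n)
  suffices H : ∀ m k (ds : List Bool), l - k ≤ m → (fillSquares ds l k).length = ds.length by
    exact H (l - k) k ds le_rfl
  intro m
  induction m with
  | zero =>
    intro k ds hm
    rw [fillSquares, dif_neg (by have := hk_le k; omega)]
  | succ m ihm =>
    intro k ds hm
    by_cases hlt : k * k < l
    · have hkl : k < l := by have := hk_le k; omega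
      rw [fillSquares, dif_pos hlt, ihm (k + 1) _ (by omega)]
      simp
    · rw [fillSquares, dif_neg hlt]

-- pointwise value of port B
theorem master_alt_eval (doors : List Bool) :
    (master_alt doors).length = doors.length ∧ ∀ j : Nat, j < doors.length →
      (master_alt doors)[j]? = some (if j = 0 then decide (4 ≤ doors.length ∧ doors.length % 2 = 0)
        else decide (Nat.sqrt j * Nat.sqrt j = j)) := by
  set l := doors.length with hl
  set ds0 := (List.range l).foldl (fun ds i => ds.set i false) doors with hds0
  have hlen0 : ds0.length = l := foldl_length_inv _ (by intro ds i; simp) _ _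
  set ds1 := fillSquares ds0 l 1 with hds1
  have hlen1 : ds1.length = l := by rw [hds1, fillSquares_length, hlen0]
  have hrw : master_alt doors = if 0 < l then ds1.set 0 (decide (4 ≤ l ∧ l % 2 = 0)) else ds1 := by
    simp only [master_alt]
    rfl
  have hpt0 : ∀ j : Nat, j < l → ds0[j]? = some false := by
    intro j hj
    rw [hds0, foldl_set_const, if_pos (List.mem_range.mpr hj), List.getElem?_eq_getElem hj]
    simp
  have hpt1 : ∀ j : Nat, j < l →
      ds1[j]? = some (decide (1 ≤ Nat.sqrt j ∧ Nat.sqrt j * Nat.sqrt j = j)) := by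
    intro j hj
    rw [hds1, fillSquares_eval l 1 ds0 hlen0 j]
    by_cases hc : 1 ≤ Nat.sqrt j ∧ Nat.sqrt j * Nat.sqrt j = j
    · rw [if_pos ⟨hc.1, hc.2, hj⟩, hpt0 j hj]
      simp [hc]
    · rw [if_neg (fun h' => hc ⟨h'.1, h'.2.1⟩), hpt0 j hj]
      simp [hc]
  constructor
  · rw [hrw]
    by_cases hpos : 0 < l
    · rw [if_pos hpos]; simpa using hlen1
    · rw [if_neg hpos]; exact hlen1
  · intro j hj
    have hpos : 0 < l := by omega
    rw [hrw, if_pos hpos]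
    by_cases hj0 : j = 0
    · subst hj0
      rw [List.getElem?_set, if_pos rfl, if_pos (by omega)]
      simp
    · rw [List.getElem?_set, if_neg (fun h' => hj0 (Eq.symm h')), hpt1 j hj, if_neg hj0]
      congr 1
      apply decide_eq_decide.mpr
      constructor
      · exact fun h => h.2
      · intro h
        refine ⟨?_, h⟩
        by_contra hz
        have : Nat.sqrt j = 0 := by omega
        rw [this] at h
        omega

-- ===== number theory: the divisor-pairing argument =====

theorem odd_card_divisors_iff {n : ℕ} (hn : n ≠ 0) :
    Odd n.divisors.card ↔ Nat.sqrt n * Nat.sqrt n = n := by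
  set L := n.divisors.filter (fun d => d * d < n) with hL
  set U := n.divisors.filter (fun d => n < d * d) with hU
  set M := n.divisors.filter (fun d => d * d = n) with hM
  have npos : 0 < n := Nat.pos_of_ne_zero hn
  have hLU : L.card = U.card := by
    apply Finset.card_nbij' (i := fun d => n / d) (j := fun d => n / d)
    · intro d hd
      simp only [hL, hU, Finset.coe_filter, Set.mem_setOf_eq, Nat.mem_divisors] at hd ⊢
      obtain ⟨⟨hdvd, _⟩, hlt⟩ := hd
      have hdpos : 0 < d := Nat.pos_of_dvd_of_pos hdvd npos
      obtain ⟨e, he⟩ := hdvd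
      have hde : n / d = e := by rw [he, Nat.mul_div_cancel_left e hdpos]
      have hlt2 : d < e := by
        apply Nat.lt_of_mul_lt_mul_left (a := d)
        rw [← he]; exact hlt
      refine ⟨⟨Nat.div_dvd_of_dvd ⟨e, he⟩, hn⟩, ?_⟩
      rw [hde]; nlinarith
    · intro d hd
      simp only [hL, hU, Finset.coe_filter, Set.mem_setOf_eq, Nat.mem_divisors] at hd ⊢
      obtain ⟨⟨hdvd, _⟩, hlt⟩ := hd
      have hdpos : 0 < d := Nat.pos_of_dvd_of_pos hdvd npos
      obtain ⟨e, he⟩ := hdvd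
      have hde : n / d = e := by rw [he, Nat.mul_div_cancel_left e hdpos]
      have hepos : 0 < e := by
        rcases Nat.eq_zero_or_pos e with h0 | h0
        · exfalso; rw [h0, Nat.mul_zero] at he; omega
        · exact h0
      have hlt2 : e < d := by
        by_contra hge
        rw [Nat.not_lt] at hge
        have : d * d ≤ d * e := Nat.mul_le_mul_left d hge
        omega
      refine ⟨⟨Nat.div_dvd_of_dvd ⟨e, he⟩, hn⟩, ?_⟩
      rw [hde]; nlinarith
    · intro d hd
      simp only [hL, Finset.coe_filter, Set.mem_setOf_eq, Nat.mem_divisors] at hd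
      exact Nat.div_div_self hd.1.1 hn
    · intro d hd
      simp only [hU, Finset.coe_filter, Set.mem_setOf_eq, Nat.mem_divisors] at hd
      exact Nat.div_div_self hd.1.1 hn
  have hsplit1 : L.card + (n.divisors.filter (fun d => ¬ d * d < n)).card = n.divisors.card :=
    Finset.filter_card_add_filter_neg_card_eq_card (fun d => d * d < n)
  have hsplit2 : M.card + U.card = (n.divisors.filter (fun d => ¬ d * d < n)).card := by
    have hMeq : M = (n.divisors.filter (fun d => ¬ d * d < n)).filter (fun d => d * d = n) := by
      rw [hM, Finset.filter_filter]
      apply Finset.filter_congr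
      intro d _
      constructor
      · intro h; exact ⟨by omega, h⟩
      · intro h; exact h.2
    have hUeq : U = (n.divisors.filter (fun d => ¬ d * d < n)).filter (fun d => ¬ d * d = n) := by
      rw [hU, Finset.filter_filter]
      apply Finset.filter_congr
      intro d _
      constructor
      · intro h; exact ⟨by omega, by omega⟩
      · intro h; omega
    rw [hMeq, hUeq]
    exact Finset.filter_card_add_filter_neg_card_eq_card (fun d => d * d = n)
  have hMcard : M.card = if Nat.sqrt n * Nat.sqrt n = n then 1 else 0 := by
    by_cases hsq : Nat.sqrt n * Nat.sqrt n = n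
    · rw [if_pos hsq]
      have : M = {Nat.sqrt n} := by
        rw [hM]
        ext d
        simp only [Finset.mem_filter, Nat.mem_divisors, Finset.mem_singleton]
        constructor
        · rintro ⟨_, hdd⟩
          rw [← hdd]; exact (Nat.sqrt_eq d).symm
        · rintro rfl
          exact ⟨⟨⟨Nat.sqrt n, hsq.symm⟩, hn⟩, hsq⟩
      rw [this, Finset.card_singleton]
    · rw [if_neg hsq]
      rw [Finset.card_eq_zero, hM]
      apply Finset.filter_eq_empty_iff.mpr
      intro d _ hdd
      exact hsq (by rw [← hdd, Nat.sqrt_eq])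
  by_cases hsq : Nat.sqrt n * Nat.sqrt n = n
  · rw [if_pos hsq] at hMcard
    simp only [hsq, iff_true]
    rw [Nat.odd_iff]; omega
  · rw [if_neg hsq] at hMcard
    simp only [hsq, iff_false]
    rw [Nat.odd_iff]; omega

theorem countP_range (n : ℕ) (p : ℕ → Bool) :
    (List.range n).countP p = ((Finset.range n).filter (fun k => p k)).card := by
  induction n with
  | zero => simp
  | succ n ih =>
    rw [List.range_succ, List.countP_append, Finset.range_add_one, Finset.filter_insert]
    by_cases hp : p n
    · rw [if_pos hp, Finset.card_insert_of_notMem (by simp)]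
      simp [hp, ih]
    · rw [if_neg hp]
      simp [hp, ih]

-- countDiv counts the divisors ≥ 3 of j
theorem countDiv_eq (j l : Nat) (h1 : 1 ≤ j) (h2 : j < l) :
    countDiv j l = (j.divisors.filter (fun d => 3 ≤ d)).card := by
  unfold countDiv
  rw [PySem.List.pyRange_one, List.countP_map]
  have hpred : ∀ k : ℕ,
      (fun s : Int => decide (j ∈ (PySem.List.pyRange 0 (l : Int) s).map Int.toNat))
        ((3 : Int) + (k : Int)) = decide ((3 + k) ∣ j) := by
    intro k
    apply decide_eq_decide.mpr
    rw [mem_multiples l (3 + (k : Int)) (by positivity) j]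
    constructor
    · rintro ⟨_, hd⟩
      have : ((3 + k : ℕ) : Int) ∣ (j : Int) := by push_cast; exact hd
      exact_mod_cast this
    · intro hd
      refine ⟨h2, ?_⟩
      have : ((3 + k : ℕ) : Int) ∣ (j : Int) := Int.natCast_dvd_natCast.mpr hd
      push_cast at this
      exact this
  have hcnt : (List.range ((l : Int) - 3).toNat).countP
      ((fun s : Int => decide (j ∈ (PySem.List.pyRange 0 (l : Int) s).map Int.toNat)) ∘
        (fun k : ℕ => (3 : Int) + (k : Int))) =
      (List.range ((l : Int) - 3).toNat).countP (fun k => decide ((3 + k) ∣ j)) :=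
    List.countP_congr (fun k _ => by simpa using hpred k)
  rw [hcnt, countP_range]
  have hlen : ((l : Int) - 3).toNat = l - 3 := by omega
  rw [hlen]
  apply Finset.card_nbij' (i := fun k => 3 + k) (j := fun d => d - 3)
  · intro k hk
    simp only [Finset.coe_filter, Set.mem_setOf_eq, Finset.mem_range, Nat.mem_divisors,
      decide_eq_true_eq] at hk ⊢
    exact ⟨⟨hk.2, by omega⟩, by omega⟩
  · intro d hd
    simp only [Finset.coe_filter, Set.mem_setOf_eq, Finset.mem_range, Nat.mem_divisors,
      decide_eq_true_eq] at hd ⊢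
    obtain ⟨⟨hdvd, _⟩, h3⟩ := hd
    have hdj : d ≤ j := Nat.le_of_dvd (by omega) hdvd
    refine ⟨by omega, ?_⟩
    have : 3 + (d - 3) = d := by omega
    rw [this]
    exact hdvd
  · intro k _
    simp
  · intro d hd
    simp only [Finset.coe_filter, Set.mem_setOf_eq, Nat.mem_divisors] at hd
    show 3 + (d - 3) = d
    omega

-- divisors < 3
theorem card_small_divisors (j : Nat) (h1 : 1 ≤ j) :
    (j.divisors.filter (fun d => ¬ 3 ≤ d)).card = if 2 ∣ j then 2 else 1 := by
  by_cases h2 : 2 ∣ j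
  · rw [if_pos h2]
    have : j.divisors.filter (fun d => ¬ 3 ≤ d) = ({1, 2} : Finset ℕ) := by
      ext d
      simp only [Finset.mem_filter, Nat.mem_divisors, Finset.mem_insert, Finset.mem_singleton]
      constructor
      · rintro ⟨⟨hdvd, _⟩, hlt⟩
        have : d ≠ 0 := by
          intro h0
          rw [h0] at hdvd
          have := Nat.eq_zero_of_zero_dvd hdvd
          omega
        omega
      · rintro (rfl | rfl)
        · exact ⟨⟨one_dvd _, by omega⟩, by omega⟩
        · exact ⟨⟨h2, by omega⟩, by omega⟩
    rw [this]
    decide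
  · rw [if_neg h2]
    have : j.divisors.filter (fun d => ¬ 3 ≤ d) = ({1} : Finset ℕ) := by
      ext d
      simp only [Finset.mem_filter, Nat.mem_divisors, Finset.mem_singleton]
      constructor
      · rintro ⟨⟨hdvd, _⟩, hlt⟩
        have hd0 : d ≠ 0 := by
          intro h0
          rw [h0] at hdvd
          have := Nat.eq_zero_of_zero_dvd hdvd
          omega
        have : d ≠ 2 := fun h => h2 (h ▸ hdvd)
        omega
      · rintro rfl
        exact ⟨⟨one_dvd _, by omega⟩, by omega⟩
    rw [this]
    decide

-- the per-door closed form, doors 1..l-1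
theorem key (j l : Nat) (h1 : 1 ≤ j) (h2 : j < l) :
    xor (decide (j % 2 = 1)) (decide (Odd (countDiv j l))) =
      decide (Nat.sqrt j * Nat.sqrt j = j) := by
  have hcard : j.divisors.card =
      (j.divisors.filter (fun d => 3 ≤ d)).card + (if 2 ∣ j then 2 else 1) := by
    rw [← card_small_divisors j h1]
    exact (Finset.filter_card_add_filter_neg_card_eq_card (fun d => 3 ≤ d)).symm
  have hodd := odd_card_divisors_iff (n := j) (by omega)
  rw [countDiv_eq j l h1 h2]
  simp only [Nat.odd_iff]
  rw [Nat.odd_iff] at hodd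
  by_cases hs : Nat.sqrt j * Nat.sqrt j = j
  · have hoddc : j.divisors.card % 2 = 1 := hodd.mpr hs
    by_cases h2d : 2 ∣ j
    · rw [if_pos h2d] at hcard
      have hj2 : j % 2 = 0 := by omega
      have hcA : (j.divisors.filter (fun d => 3 ≤ d)).card % 2 = 1 := by omega
      simp [hj2, hcA, hs]
    · rw [if_neg h2d] at hcard
      have hj2 : j % 2 = 1 := by omega
      have hcA : (j.divisors.filter (fun d => 3 ≤ d)).card % 2 = 0 := by omega
      simp [hj2, hcA, hs]
  · have hoddc : ¬ j.divisors.card % 2 = 1 := fun hh => hs (hodd.mp hh)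
    by_cases h2d : 2 ∣ j
    · rw [if_pos h2d] at hcard
      have hj2 : j % 2 = 0 := by omega
      have hcA : (j.divisors.filter (fun d => 3 ≤ d)).card % 2 = 0 := by omega
      simp [hj2, hcA, hs]
    · rw [if_neg h2d] at hcard
      have hj2 : j % 2 = 1 := by omega
      have hcA : (j.divisors.filter (fun d => 3 ≤ d)).card % 2 = 1 := by omega
      simp [hj2, hcA, hs]

-- door 0
theorem key0 (l : Nat) (h : 0 < l) :
    xor (decide ((0 : Nat) % 2 = 1)) (decide (Odd (countDiv 0 l))) =
      decide (4 ≤ l ∧ l % 2 = 0) := by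
  have hc : countDiv 0 l = l - 3 := by
    unfold countDiv
    rw [List.countP_eq_length.mpr ?_, PySem.List.length_pyRange_one]
    · omega
    · intro s hsmem
      have hs3 : 3 ≤ s := ((PySem.List.mem_pyRange_one).mp hsmem).1
      simp only [decide_eq_true_eq]
      exact (mem_multiples l s (by omega) 0).mpr ⟨h, by simp⟩
  rw [hc, show (decide ((0 : Nat) % 2 = 1)) = false from rfl, Bool.false_xor]
  apply decide_eq_decide.mpr
  rw [Nat.odd_iff]
  omega

-- ===== VERDICT (by name: the statement is the Claim_ definition above) =====
theorem master_spec : Claim_equal_master := by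
  intro doors _
  show master doors = master_alt doors
  obtain ⟨hal, ha⟩ := master_eval doors
  obtain ⟨hbl, hb⟩ := master_alt_eval doors
  apply List.ext_getElem?
  intro j
  by_cases hj : j < doors.length
  · rw [ha j hj, hb j hj]
    rcases Nat.eq_zero_or_pos j with h0 | h1
    · subst h0
      rw [key0 doors.length hj]
      simp
    · rw [if_neg (by omega)]
      rw [key j doors.length h1 hj]
  · rw [List.getElem?_eq_none (by omega), List.getElem?_eq_none (by omega)]
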